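-- pv_equiv track=rewrite | github.com/Jaaccob/Academic | II semestr/Algorytmy i Programowanie/Konwersatorium/Zestaw 2/Zadanie 1.py | sumProductF
-- ===== SOURCE A (Python) =====
-- def sumProductF(table):
--     # Złożoność teta = n^2x`
--     sumTab = 0
--     for i in range(len(table)):
--         iloczyn = 1
--         for j in range(i, len(table)):
--             iloczyn *= table[j]
--         sumTab += iloczyn
--     return sumTab
-- ===== SOURCE B (Python) =====
-- def sumProductF(table):
--     running = 1
--     total = 0
--     for x in reversed(table):
--         running *= x
--         total += running
--     return total
-- ===== Notes on version B (the rewrite author's own statement) =====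
-- stated objective: faster
-- what changed: Replaced the nested index loops (recomputing each suffix product from scratch) by a single right-to-left pass maintaining a running suffix product.
import Mathlib
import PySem

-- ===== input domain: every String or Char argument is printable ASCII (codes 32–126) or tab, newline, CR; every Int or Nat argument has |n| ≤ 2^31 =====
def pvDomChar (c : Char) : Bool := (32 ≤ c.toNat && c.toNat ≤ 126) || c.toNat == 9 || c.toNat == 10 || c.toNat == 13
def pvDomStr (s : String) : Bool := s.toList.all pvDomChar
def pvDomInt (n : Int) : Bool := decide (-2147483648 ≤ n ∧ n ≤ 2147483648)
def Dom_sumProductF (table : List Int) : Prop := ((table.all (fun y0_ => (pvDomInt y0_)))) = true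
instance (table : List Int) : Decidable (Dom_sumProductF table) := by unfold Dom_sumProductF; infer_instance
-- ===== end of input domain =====

-- B replaces A's nested index loops by one right-to-left pass with a running suffix product (O(n^2) → O(n)).


-- ===== PORT A =====
def sumProductF (table : List Int) : Int :=
  (PySem.List.pyRange 0 (table.length : Int) 1).foldl
    (fun sumTab i =>
      sumTab +
        (PySem.List.pyRange i (table.length : Int) 1).foldl
          (fun iloczyn j => iloczyn * PySem.List.pyGetD table j 0) 1)
    0

-- ===== PORT B =====
def sumProductF_alt (table : List Int) : Int :=
  (table.foldr (fun x acc => (acc.1 * x, acc.2 + acc.1 * x)) ((1 : Int), (0 : Int))).2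

-- ===== PRECONDITION & SPEC =====
def Spec_sumProductF (table : List Int) (out : Int) : Prop := out = sumProductF_alt table
instance (table : List Int) (out : Int) : Decidable (Spec_sumProductF table out) := by unfold Spec_sumProductF; infer_instance

-- ===== CLAIM (what is proved, stated in full; the proofs are below) =====
def Claim_equal_sumProductF : Prop := ∀ (table : List Int), Dom_sumProductF table → Spec_sumProductF table (sumProductF table)

-- ===== LEMMAS AND PROOFS =====

-- the sum of all suffix products, as structural recursion (common reference for both ports)
def suffixSum : List Int → Int
  | [] => 0
  | x :: xs => (x :: xs).prod + suffixSum xs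

lemma foldr_alt_eq (l : List Int) :
    l.foldr (fun x acc => (acc.1 * x, acc.2 + acc.1 * x)) ((1 : Int), (0 : Int))
      = (l.prod, suffixSum l) := by
  induction l with
  | nil => simp [suffixSum]
  | cons x xs ih =>
      simp [List.foldr, ih, suffixSum, List.prod_cons]
      constructor <;> ring

lemma alt_eq_suffixSum (l : List Int) : sumProductF_alt l = suffixSum l := by
  simp [sumProductF_alt, foldr_alt_eq]

lemma foldl_mul_one (l : List Int) : l.foldl (· * ·) 1 = l.prod := by
  simp [List.prod_eq_foldl]

lemma a_eq_suffixSum (l : List Int) : sumProductF l = suffixSum l := by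
  unfold sumProductF
  rw [PySem.List.foldl_congr_mem _ _
      (fun sumTab i => sumTab + (l.drop i.toNat).prod) 0
      (by
        intro acc i hi
        have h0 : (0 : Int) ≤ i := ((PySem.List.mem_pyRange_one).1 hi).1
        rw [PySem.List.foldl_pyRange_pyGetD' l 0 (fun a b => a * b) 1 h0, foldl_mul_one])]
  rw [PySem.List.foldl_add, PySem.List.pyRange_one, List.map_map]
  have hmap : ((fun i : Int => (l.drop i.toNat).prod) ∘ fun k : Nat => (0 : Int) + k)
      = fun k : Nat => (l.drop k).prod := by
    funext k; simp
  rw [hmap]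
  clear hmap
  simp only [sub_zero, Int.toNat_natCast]
  induction l with
  | nil => simp [suffixSum]
  | cons x xs ih =>
      rw [List.length_cons, List.range_succ_eq_map, List.map_cons, List.map_map, List.sum_cons]
      have hmap2 : ((fun k : Nat => ((x :: xs).drop k).prod) ∘ Nat.succ)
          = fun k : Nat => (xs.drop k).prod := by
        funext k; simp
      rw [hmap2, suffixSum]
      simp only [List.drop_zero]
      omega

-- ===== VERDICT (by name: the statement is the Claim_ definition above) =====
theorem sumProductF_spec : Claim_equal_sumProductF := by
  intro table _
  unfold Spec_sumProductF
  rw [a_eq_suffixSum, alt_eq_suffixSum]
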